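-- pv_equiv track=rewrite | github.com/gaowei-space/skills | skills/sora-watermark-lite/scripts/clean_lite.py | fill_missed_bboxes
-- ===== SOURCE A (Python) =====
-- from typing import Optional
--
-- def fill_missed_bboxes(bboxes: list[Optional[tuple[int, int, int, int]]], max_gap: int) -> list[Optional[tuple[int, int, int, int]]]:
--     out = list(bboxes)
--     last_box: Optional[tuple[int, int, int, int]] = None
--     last_seen = -10**9
--     for idx, box in enumerate(out):
--         if box is not None:
--             last_box = box
--             last_seen = idx
--             continue
--         if last_box is not None and (idx - last_seen) <= max_gap:
--             out[idx] = last_box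
--     return out
-- ===== SOURCE B (Python) =====
-- from typing import Optional
--
-- def fill_missed_bboxes(bboxes: list[Optional[tuple[int, int, int, int]]], max_gap: int) -> list[Optional[tuple[int, int, int, int]]]:
--     out = []
--     i = 0
--     n = len(bboxes)
--     while i < n:
--         b = bboxes[i]
--         out.append(b)
--         i += 1
--         if b is not None:
--             g = 0
--             while i < n and bboxes[i] is None and g < max_gap:
--                 out.append(b)
--                 i += 1
--                 g += 1
--     return out
-- ===== Notes on version B (the rewrite author's own statement) =====
-- stated objective: alternative
-- what changed: Replaces A's single stateful scan (carrying last_box and last_seen index, writing into a copy in place) with a run-consuming two-loop structure: emit each element; after a known box, an inner loop fills the following run of Nones with that box while a counter stays below max_gap.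
import Mathlib
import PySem

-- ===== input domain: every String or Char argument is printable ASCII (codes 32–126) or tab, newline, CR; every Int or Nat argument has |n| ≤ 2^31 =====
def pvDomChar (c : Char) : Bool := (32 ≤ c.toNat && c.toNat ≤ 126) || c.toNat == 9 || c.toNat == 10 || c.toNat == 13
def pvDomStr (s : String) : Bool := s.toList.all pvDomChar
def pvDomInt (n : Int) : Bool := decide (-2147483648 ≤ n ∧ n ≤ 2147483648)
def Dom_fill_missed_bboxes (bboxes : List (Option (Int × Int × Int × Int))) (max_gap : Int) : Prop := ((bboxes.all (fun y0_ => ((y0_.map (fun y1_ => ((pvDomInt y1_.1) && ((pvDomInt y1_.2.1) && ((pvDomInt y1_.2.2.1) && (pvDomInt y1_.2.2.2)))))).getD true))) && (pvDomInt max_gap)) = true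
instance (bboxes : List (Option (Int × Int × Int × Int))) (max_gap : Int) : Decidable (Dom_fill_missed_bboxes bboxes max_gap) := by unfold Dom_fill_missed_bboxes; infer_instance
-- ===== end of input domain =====

-- B replaces A's running last-seen-index scan by a run-consuming recursion (emit a known box,
-- then fill the following run of Nones up to max_gap); objective: alternative decomposition, same cost.


-- ===== PORT A =====
-- Literal port of A: enumerate over `out` (initialised to a copy of `bboxes`); since the loop
-- writes only at the index it has already read, iterating over the initial list is exact.
-- `out[idx] = last_box` is `List.set idx.toNat`; idx from enumerate starting at 0 is nonnegative.
def fill_missed_bboxes (bboxes : List (Option (Int × Int × Int × Int))) (max_gap : Int) : List (Option (Int × Int × Int × Int)) :=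
  ((PySem.List.enumerate bboxes 0).foldl
    (fun (st : List (Option (Int × Int × Int × Int)) × Option (Int × Int × Int × Int) × Int)
         (p : Int × Option (Int × Int × Int × Int)) =>
      match p.2 with
      | some b => (st.1, some b, p.1)
      | none =>
        match st.2.1 with
        | some lb => if p.1 - st.2.2 ≤ max_gap then (st.1.set p.1.toNat (some lb), st.2.1, st.2.2) else st
        | none => st)
    (bboxes, none, -(10 ^ 9 : Int))).1

-- ===== PORT B =====
-- B's outer while loop (emit the current element; on a known box enter the inner filling loop)
-- and inner while loop (fill Nones while the counter is below max_gap) as a mutual recursion.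
mutual
def fmbGo : List (Option (Int × Int × Int × Int)) → Int → List (Option (Int × Int × Int × Int))
  | [], _ => []
  | none :: r, mg => none :: fmbGo r mg
  | some v :: r, mg => some v :: fmbFill r mg v 0
def fmbFill : List (Option (Int × Int × Int × Int)) → Int → (Int × Int × Int × Int) → Int → List (Option (Int × Int × Int × Int))
  | none :: r, mg, v, cnt => if cnt < mg then some v :: fmbFill r mg v (cnt + 1) else none :: fmbGo r mg
  | r, mg, _, _ => fmbGo r mg
end

def fill_missed_bboxes_alt (bboxes : List (Option (Int × Int × Int × Int))) (max_gap : Int) : List (Option (Int × Int × Int × Int)) :=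
  fmbGo bboxes max_gap

-- ===== PRECONDITION & SPEC =====
def Spec_fill_missed_bboxes (bboxes : List (Option (Int × Int × Int × Int))) (max_gap : Int) (out : List (Option (Int × Int × Int × Int))) : Prop := out = fill_missed_bboxes_alt bboxes max_gap
instance (bboxes : List (Option (Int × Int × Int × Int))) (max_gap : Int) (out : List (Option (Int × Int × Int × Int))) : Decidable (Spec_fill_missed_bboxes bboxes max_gap out) := by unfold Spec_fill_missed_bboxes; infer_instance

-- ===== CLAIM (what is proved, stated in full; the proofs are below) =====
def Claim_equal_fill_missed_bboxes : Prop := ∀ (bboxes : List (Option (Int × Int × Int × Int))) (max_gap : Int), Dom_fill_missed_bboxes bboxes max_gap → Spec_fill_missed_bboxes bboxes max_gap (fill_missed_bboxes bboxes max_gap)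

-- ===== LEMMAS AND PROOFS =====

-- Pointwise characterisation of A's loop: carry the last seen box and the distance to it.
def auxA (g : Int) : List (Option (Int × Int × Int × Int)) → Option (Int × Int × Int × Int) → Int → List (Option (Int × Int × Int × Int))
  | [], _, _ => []
  | b :: r, last, d =>
    match b with
    | some v => some v :: auxA g r (some v) 1
    | none =>
      (match last with
       | some v => if d ≤ g then some v else none
       | none => none) :: auxA g r last (d + 1)

theorem set_append_len {α : Type} (done : List α) (x y : α) (s : List α) :
    (done ++ x :: s).set done.length y = done ++ y :: s := by
  induction done with
  | nil => simp
  | cons a t ih => simp [ih]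

theorem foldA_eq_auxA (g : Int) (s done : List (Option (Int × Int × Int × Int)))
    (last : Option (Int × Int × Int × Int)) (ls : Int) :
    ((PySem.List.enumerate s (done.length : Int)).foldl
      (fun (st : List (Option (Int × Int × Int × Int)) × Option (Int × Int × Int × Int) × Int)
           (p : Int × Option (Int × Int × Int × Int)) =>
        match p.2 with
        | some b => (st.1, some b, p.1)
        | none =>
          match st.2.1 with
          | some lb => if p.1 - st.2.2 ≤ g then (st.1.set p.1.toNat (some lb), st.2.1, st.2.2) else st
          | none => st)
      (done ++ s, last, ls)).1
    = done ++ auxA g s last ((done.length : Int) - ls) := by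
  induction s generalizing done last ls with
  | nil => simp [auxA, PySem.List.enumerate_nil]
  | cons b r ih =>
    rw [PySem.List.enumerate_cons, List.foldl_cons]
    cases b with
    | some v =>
      have h := ih (done ++ [some v]) (some v) (done.length : Int)
      simp only [List.length_append, List.length_cons, List.length_nil] at h
      push_cast at h
      simp only [List.append_assoc, List.cons_append, List.nil_append] at h
      simp only [auxA]
      rw [show ((done.length : Int) + 1) = ((done.length : Int) + 1) from rfl] at h
      simpa [add_sub_cancel_left] using h
    | none =>
      cases last with
      | none =>
        have h := ih (done ++ [none]) none ls
        simp only [List.length_append, List.length_cons, List.length_nil] at h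
        push_cast at h
        simp only [List.append_assoc, List.cons_append, List.nil_append] at h
        simp only [auxA]
        rw [show (done.length : Int) + 1 - ls = (done.length : Int) - ls + 1 by ring] at h
        simpa using h
      | some lb =>
        by_cases hc : (done.length : Int) - ls ≤ g
        · simp only [auxA, hc, if_pos]
          have hset : (done ++ (none : Option (Int × Int × Int × Int)) :: r).set (done.length : Int).toNat (some lb) = done ++ some lb :: r := by
            rw [Int.toNat_natCast]; exact set_append_len done none (some lb) r
          have h := ih (done ++ [some lb]) (some lb) ls
          simp only [List.length_append, List.length_cons, List.length_nil] at h
          push_cast at h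
          simp only [List.append_assoc, List.cons_append, List.nil_append] at h
          rw [show (done.length : Int) + 1 - ls = (done.length : Int) - ls + 1 by ring] at h
          simpa [hc, hset] using h
        · simp only [auxA, hc]
          have h := ih (done ++ [none]) (some lb) ls
          simp only [List.length_append, List.length_cons, List.length_nil] at h
          push_cast at h
          simp only [List.append_assoc, List.cons_append, List.nil_append] at h
          rw [show (done.length : Int) + 1 - ls = (done.length : Int) - ls + 1 by ring] at h
          simpa [hc] using h

-- auxA with a known last box and distance already past the gap behaves like fmbGo, and with
-- distance cnt+1 like fmbFill with counter cnt.
theorem auxA_some (g : Int) (s : List (Option (Int × Int × Int × Int))) :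
    (∀ v d, g < d → auxA g s (some v) d = fmbGo s g) ∧
    (∀ v (k : Int), auxA g s (some v) (k + 1) = fmbFill s g v k) := by
  induction s with
  | nil => exact ⟨fun _ _ _ => by simp [auxA, fmbGo], fun _ _ => by simp [auxA, fmbGo, fmbFill]⟩
  | cons b r ih =>
    refine ⟨fun v d hd => ?_, fun v k => ?_⟩
    · cases b with
      | some w =>
        have h0 := ih.2 w 0
        norm_num at h0
        simp [auxA, fmbGo, h0]
      | none =>
        have : ¬ d ≤ g := by omega
        simp [auxA, fmbGo, this, ih.1 v (d + 1) (by omega)]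
    · cases b with
      | some w =>
        have h0 := ih.2 w 0
        norm_num at h0
        simp [auxA, fmbGo, fmbFill, h0]
      | none =>
        by_cases hk : k < g
        · have : k + 1 ≤ g := by omega
          simp [auxA, fmbFill, this, hk, ih.2 v (k + 1)]
        · have h1 : ¬ k + 1 ≤ g := by omega
          simp [auxA, fmbFill, h1, hk, ih.1 v (k + 1 + 1) (by omega)]

theorem auxA_none (g : Int) (s : List (Option (Int × Int × Int × Int))) (d : Int) :
    auxA g s none d = fmbGo s g := by
  induction s generalizing d with
  | nil => simp [auxA, fmbGo]
  | cons b r ih =>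
    cases b with
    | some w =>
      have h0 := (auxA_some g r).2 w 0
      norm_num at h0
      simp [auxA, fmbGo, h0]
    | none => simp [auxA, fmbGo, ih]

-- ===== VERDICT (by name: the statement is the Claim_ definition above) =====
theorem fill_missed_bboxes_spec : Claim_equal_fill_missed_bboxes := by
  intro bboxes max_gap _
  unfold Spec_fill_missed_bboxes fill_missed_bboxes fill_missed_bboxes_alt
  have h := foldA_eq_auxA max_gap bboxes [] none (-(10 ^ 9 : Int))
  simp only [List.length_nil, List.nil_append, Nat.cast_zero] at h
  rw [h, auxA_none]
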